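-- pv_equiv track=rewrite | github.com/m1ntm1nd/dz_algo_1 | algotinkov/intel-camp/1.py | solve
-- ===== SOURCE A (Python) =====
-- def solve(array):
--     ans = []
--     i = 0
--     while i < len(array):
--         stop = i
--         t = i
--         for j in range(i+1,len(array)):
--             if array[j] >= array[i]:
--                 stop = j
--         if stop == i:
--             ans.append(i)
--         i = max(stop+1,t+1)
--     return ans
-- ===== SOURCE B (Python) =====
-- def solve(array):
--     # Suffix-max table + binary search replaces A's O(n^2) rescans: the last index j > i
--     # with array[j] >= array[i] is the last j with suffmax[j] >= array[i].
--     n = len(array)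
--     suffmax = [0] * n
--     for j in range(n - 1, -1, -1):
--         suffmax[j] = array[j] if j == n - 1 else max(array[j], suffmax[j + 1])
--     ans = []
--     i = 0
--     while i < n:
--         v = array[i]
--         if i + 1 >= n or suffmax[i + 1] < v:
--             ans.append(i)
--             i += 1
--         else:
--             lo, hi = i + 1, n - 1
--             while lo < hi:
--                 mid = (lo + hi + 1) // 2
--                 if suffmax[mid] >= v:
--                     lo = mid
--                 else:
--                     hi = mid - 1
--             i = lo + 1
--     return ans
-- ===== Notes on version B (the rewrite author's own statement) =====
-- stated objective: faster
-- what changed: replaces A's O(n) rescan of the tail at every position by a precomputed suffix-maximum table plus an O(log n) binary search for the last index whose suffix max reaches the pivot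
import Mathlib
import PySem

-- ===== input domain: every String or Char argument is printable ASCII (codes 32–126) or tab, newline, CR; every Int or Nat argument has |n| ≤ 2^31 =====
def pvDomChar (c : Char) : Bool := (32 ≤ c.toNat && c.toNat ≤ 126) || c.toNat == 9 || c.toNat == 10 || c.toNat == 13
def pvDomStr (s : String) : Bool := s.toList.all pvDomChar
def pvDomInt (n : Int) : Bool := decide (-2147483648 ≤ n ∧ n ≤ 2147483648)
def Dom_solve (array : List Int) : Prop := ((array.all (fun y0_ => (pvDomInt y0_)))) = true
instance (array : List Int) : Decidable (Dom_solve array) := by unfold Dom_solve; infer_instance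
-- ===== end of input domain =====

-- B replaces A's quadratic rescans by a suffix-max table and binary search; proved to return A's exact value.

-- ===== PORT A =====
-- termination measure lemma for the while-loops (cited by decreasing_by)
theorem pv_dec_lt (len i j : Int) (h : i < len) (hj : i + 1 ≤ j) :
    (len - j).toNat < (len - i).toNat := by omega

-- while-loop of A as recursion on the index i; ans is the accumulator Python appends to
def solveGo (array : List Int) (i : Int) (ans : List Int) : List Int :=
  if _h : i < (array.length : Int) then
    let stop := (PySem.List.pyRange (i+1) (array.length : Int) 1).foldl
      (fun s j => if PySem.List.pyGetD array j 0 ≥ PySem.List.pyGetD array i 0 then j else s) i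
    let t := i
    let ans' := if stop = i then ans ++ [i] else ans
    solveGo array (max (stop+1) (t+1)) ans'
  else ans
termination_by ((array.length : Int) - i).toNat
decreasing_by exact pv_dec_lt _ _ _ _h (le_max_right _ _)

def solve (array : List Int) : List Int := solveGo array 0 []

-- ===== PORT B =====
-- Source B fills suffmax right-to-left: suffmax[j] = array[j] at the end, else max(array[j], suffmax[j+1]);
-- this recursion builds exactly that list back-to-front
def suffMax : List Int → List Int
  | [] => []
  | x :: xs =>
    match suffMax xs with
    | [] => [x]
    | m :: ms => max x m :: m :: ms

-- midpoint bounds and termination lemmas for the binary search (cited by decreasing_by)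
theorem pv_bsearch_mid (lo hi : Int) (h : lo < hi) :
    lo + 1 ≤ PySem.Int.floordiv (lo + hi + 1) 2 ∧ PySem.Int.floordiv (lo + hi + 1) 2 ≤ hi := by
  have hb := PySem.Int.floordiv_two_mid_bounds (lo := lo + 1) (hi := hi) (by omega)
  have e : lo + 1 + hi = lo + hi + 1 := by ring
  rw [e] at hb
  exact hb

theorem pv_bsearch_dec1 (lo hi : Int) (h : lo < hi) :
    (hi - PySem.Int.floordiv (lo + hi + 1) 2).toNat < (hi - lo).toNat := by
  have := pv_bsearch_mid lo hi h
  omega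

theorem pv_bsearch_dec2 (lo hi : Int) (h : lo < hi) :
    (PySem.Int.floordiv (lo + hi + 1) 2 - 1 - lo).toNat < (hi - lo).toNat := by
  have := pv_bsearch_mid lo hi h
  omega

-- Source B's inner `while lo < hi` binary-search loop
def bsearch (M : List Int) (v : Int) (lo hi : Int) : Int :=
  if _h : lo < hi then
    let mid := PySem.Int.floordiv (lo + hi + 1) 2
    if PySem.List.pyGetD M mid 0 ≥ v then bsearch M v mid hi
    else bsearch M v lo (mid - 1)
  else lo
termination_by (hi - lo).toNat
decreasing_by
  · exact pv_bsearch_dec1 _ _ _h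
  · exact pv_bsearch_dec2 _ _ _h

-- lower bound on bsearch's result, cited by solveGoB's decreasing_by
theorem bsearch_lb (M : List Int) (v : Int) (lo hi : Int) : lo ≤ bsearch M v lo hi := by
  fun_induction bsearch M v lo hi with
  | case1 lo hi h mid hge ih =>
      have hb := pv_bsearch_mid lo hi h
      omega
  | case2 lo hi h mid hge ih => omega
  | case3 lo hi h => omega

-- Source B's outer while loop
def solveGoB (M : List Int) (array : List Int) (i : Int) (ans : List Int) : List Int :=
  if _h : i < (array.length : Int) then
    let v := PySem.List.pyGetD array i 0
    if (array.length : Int) ≤ i + 1 ∨ PySem.List.pyGetD M (i + 1) 0 < v then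
      solveGoB M array (i + 1) (ans ++ [i])
    else
      solveGoB M array (bsearch M v (i + 1) ((array.length : Int) - 1) + 1) ans
  else ans
termination_by ((array.length : Int) - i).toNat
decreasing_by
  · exact pv_dec_lt _ _ _ _h (le_refl _)
  · exact pv_dec_lt _ _ _ _h
      (le_trans (bsearch_lb M (PySem.List.pyGetD array i 0) (i + 1) ((array.length : Int) - 1))
        (Int.le_add_one (le_refl _)))

def solve_alt (array : List Int) : List Int := solveGoB (suffMax array) array 0 []

-- ===== PRECONDITION & SPEC =====
def Spec_solve (array : List Int) (out : List Int) : Prop := out = solve_alt array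
instance (array : List Int) (out : List Int) : Decidable (Spec_solve array out) := by unfold Spec_solve; infer_instance

-- ===== CLAIM (what is proved, stated in full; the proofs are below) =====
def Claim_equal_solve : Prop := ∀ (array : List Int), Dom_solve array → Spec_solve array (solve array)

-- ===== LEMMAS AND PROOFS =====

theorem suffMax_length (xs : List Int) : (suffMax xs).length = xs.length := by
  induction xs with
  | nil => rfl
  | cons x xs ih =>
    simp only [suffMax]
    cases h : suffMax xs with
    | nil => simp [← ih, h]
    | cons m ms => simp [← ih, h]

-- every suffix element is ≤ the suffix max
theorem suffMax_ge (xs : List Int) : ∀ (j k : Nat), j ≤ k → k < xs.length →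
    xs.getD k 0 ≤ (suffMax xs).getD j 0 := by
  induction xs with
  | nil => intro j k _ hk; simp at hk
  | cons x xs ih =>
    intro j k hjk hk
    simp only [suffMax]
    cases hsm : suffMax xs with
    | nil =>
      have : xs = [] := by
        have := suffMax_length xs; rw [hsm] at this; simpa using (List.length_eq_zero_iff.mp this.symm)
      subst this
      simp at hk
      subst hk
      interval_cases j <;> simp
    | cons m ms =>
      cases j with
      | zero =>
        cases k with
        | zero => simp
        | succ k' =>
          have h1 : xs.getD k' 0 ≤ (suffMax xs).getD 0 0 := ih 0 k' (Nat.zero_le _) (by simpa using hk)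
          rw [hsm] at h1
          simp at h1 ⊢
          right; exact h1
      | succ j' =>
        cases k with
        | zero => omega
        | succ k' =>
          have h1 := ih j' k' (by omega) (by simpa using hk)
          rw [hsm] at h1
          simpa using h1

-- the suffix max is attained at some suffix position
theorem suffMax_attained (xs : List Int) : ∀ (j : Nat), j < xs.length →
    ∃ k, j ≤ k ∧ k < xs.length ∧ (suffMax xs).getD j 0 = xs.getD k 0 := by
  induction xs with
  | nil => intro j hj; simp at hj
  | cons x xs ih =>
    intro j hj
    simp only [suffMax]
    cases hsm : suffMax xs with
    | nil =>
      have : xs = [] := by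
        have := suffMax_length xs; rw [hsm] at this; simpa using (List.length_eq_zero_iff.mp this.symm)
      subst this
      simp at hj
      subst hj
      exact ⟨0, le_refl _, by simp, by simp⟩
    | cons m ms =>
      have hxs : 0 < xs.length := by
        have := suffMax_length xs; rw [hsm] at this; simp at this; omega
      cases j with
      | zero =>
        rcases le_total x m with hxm | hmx
        · obtain ⟨k, hk1, hk2, hk3⟩ := ih 0 hxs
          rw [hsm] at hk3; simp at hk3
          refine ⟨k + 1, by omega, by simp; omega, ?_⟩
          simp only [List.getD_cons_zero, List.getD_cons_succ]
          rw [max_eq_right hxm]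
          simpa [List.getD] using hk3
        · exact ⟨0, le_refl _, by simp, by simp [max_eq_left hmx]⟩
      | succ j' =>
        obtain ⟨k, hk1, hk2, hk3⟩ := ih j' (by simpa using hj)
        rw [hsm] at hk3
        exact ⟨k + 1, by omega, by simp; omega, by simpa using hk3⟩

-- suffix max is antitone in the index
theorem suffMax_mono (xs : List Int) (j k : Nat) (hjk : j ≤ k) (hk : k < xs.length) :
    (suffMax xs).getD k 0 ≤ (suffMax xs).getD j 0 := by
  obtain ⟨k0, hk01, hk02, hk03⟩ := suffMax_attained xs k hk
  rw [hk03]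
  exact suffMax_ge xs j k0 (le_trans hjk hk01) hk02

-- pyGetD at a nonnegative in-range Int index is getD at the Nat index
theorem pyGetD_toNat (xs : List Int) (t : Int) (h0 : 0 ≤ t) (_h : t < (xs.length : Int)) :
    PySem.List.pyGetD xs t 0 = xs.getD t.toNat 0 :=
  PySem.List.pyGetD_of_nonneg xs 0 h0

-- A's inner for-loop keeps the LAST qualifying index: it is getLast? of the filtered range
theorem foldl_last (array : List Int) (i : Int) : ∀ (l : List Int) (s0 : Int),
    l.foldl (fun s j => if PySem.List.pyGetD array j 0 ≥ PySem.List.pyGetD array i 0 then j else s) s0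
      = ((l.filter (fun j => decide (PySem.List.pyGetD array j 0 ≥ PySem.List.pyGetD array i 0))).getLast?).getD s0 := by
  intro l
  induction l with
  | nil => intro s0; rfl
  | cons x l ih =>
    intro s0
    by_cases hc : PySem.List.pyGetD array x 0 ≥ PySem.List.pyGetD array i 0
    · rw [List.foldl_cons, if_pos hc, ih, List.filter_cons_of_pos (by simpa using hc)]
      cases hfl : l.filter (fun j => decide (PySem.List.pyGetD array j 0 ≥ PySem.List.pyGetD array i 0)) with
      | nil => simp
      | cons a as => simp [List.getLast?_cons]
    · rw [List.foldl_cons, if_neg hc, ih, List.filter_cons_of_neg (by simpa using hc)]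

-- in a strictly increasing list every element is ≤ the last one
theorem pairwise_le_getLast : ∀ (l : List Int), l.Pairwise (fun a b => a < b) →
    ∀ x ∈ l, ∀ y, l.getLast? = some y → x ≤ y := by
  intro l
  induction l with
  | nil => intro _ x hx; simp at hx
  | cons a l ih =>
    intro hp x hx y hy
    cases l with
    | nil =>
      simp at hx hy
      omega
    | cons b l' =>
      rw [List.getLast?_cons_cons] at hy
      rcases List.mem_cons.mp hx with rfl | hx'
      · have hmem : y ∈ b :: l' := List.mem_of_getLast? hy
        have := (List.pairwise_cons.mp hp).1 y hmem
        omega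
      · exact ih (List.pairwise_cons.mp hp).2 x hx' y hy

-- full correctness of the binary search on an antitone table
theorem bsearch_correct : ∀ (n : Nat) (M : List Int) (v lo hi : Int), (hi - lo).toNat = n →
    0 ≤ lo → lo ≤ hi → hi < (M.length : Int) →
    (∀ j k : Int, lo ≤ j → j ≤ k → k ≤ hi → PySem.List.pyGetD M k 0 ≤ PySem.List.pyGetD M j 0) →
    v ≤ PySem.List.pyGetD M lo 0 →
    lo ≤ bsearch M v lo hi ∧ bsearch M v lo hi ≤ hi ∧ v ≤ PySem.List.pyGetD M (bsearch M v lo hi) 0 ∧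
      ∀ k : Int, bsearch M v lo hi < k → k ≤ hi → PySem.List.pyGetD M k 0 < v := by
  intro n
  induction n using Nat.strong_induction_on with
  | _ n IH =>
    intro M v lo hi hn h0 hlh hhi mono hlo
    rw [bsearch]
    by_cases hlt : lo < hi
    · rw [dif_pos hlt]
      have hb := PySem.Int.floordiv_two_mid_bounds (lo := lo + 1) (hi := hi) (by omega)
      have e : lo + 1 + hi = lo + hi + 1 := by ring
      rw [e] at hb
      set mid := PySem.Int.floordiv (lo + hi + 1) 2 with hmid
      by_cases hc : PySem.List.pyGetD M mid 0 ≥ v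
      · rw [if_pos hc]
        have hres := IH ((hi - mid).toNat) (by omega) M v mid hi rfl (by omega) (by omega) hhi
          (fun j k hj hjk hk => mono j k (by omega) hjk hk) hc
        exact ⟨by omega, hres.2.1, hres.2.2.1, hres.2.2.2⟩
      · rw [if_neg hc]
        have hres := IH ((mid - 1 - lo).toNat) (by omega) M v lo (mid - 1) rfl h0 (by omega)
          (by omega) (fun j k hj hjk hk => mono j k hj hjk (by omega)) hlo
        refine ⟨hres.1, by omega, hres.2.2.1, ?_⟩
        intro k hk1 hk2
        by_cases hk3 : k ≤ mid - 1
        · exact hres.2.2.2 k hk1 hk3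
        · have h1 : PySem.List.pyGetD M k 0 ≤ PySem.List.pyGetD M mid 0 :=
            mono mid k (by omega) (by omega) hk2
          omega
    · rw [dif_neg hlt]
      exact ⟨le_refl _, hlh, hlo, fun k hk1 hk2 => by omega⟩

-- the main loop equivalence
theorem go_eq (array : List Int) : ∀ (n : Nat) (i : Int) (ans : List Int), 0 ≤ i →
    ((array.length : Int) - i).toNat = n →
    solveGo array i ans = solveGoB (suffMax array) array i ans := by
  intro n
  induction n using Nat.strong_induction_on with
  | _ n IH =>
    intro i ans h0 hn
    rw [solveGo, solveGoB]
    by_cases hi : i < (array.length : Int)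
    · rw [dif_pos hi, dif_pos hi]
      simp only [foldl_last]
      set v := PySem.List.pyGetD array i 0 with hv
      set fl := ((PySem.List.pyRange (i + 1) (array.length : Int) 1).filter
        (fun j => decide (PySem.List.pyGetD array j 0 ≥ v))) with hfl
      have hflmem : ∀ j ∈ fl, (i + 1 ≤ j ∧ j < (array.length : Int)) ∧ v ≤ PySem.List.pyGetD array j 0 := by
        intro j hj
        rw [hfl] at hj
        have h1 := List.mem_of_mem_filter hj
        have h2 := List.of_mem_filter hj
        simp at h2
        exact ⟨(PySem.List.mem_pyRange_one).mp h1, h2⟩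
      cases hflc : fl with
      | nil =>
        -- no later element reaches array[i]: both sides append i and step to i+1
        have hstop : fl.getLast?.getD i = i := by rw [hflc]; rfl
        rw [hflc] at hstop
        have hA : (if ([] : List Int).getLast?.getD i = i then ans ++ [i] else ans) = ans ++ [i] := by
          simp
        have hcond : ((array.length : Int) ≤ i + 1 ∨ PySem.List.pyGetD (suffMax array) (i + 1) 0 < v) := by
          by_cases hl : (array.length : Int) ≤ i + 1
          · exact Or.inl hl
          · right
            push_neg at hl
            have hlen : ((suffMax array).length : Int) = (array.length : Int) := by
              rw [suffMax_length]
            rw [pyGetD_toNat _ _ (by omega) (by omega)]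
            obtain ⟨k, hk1, hk2, hk3⟩ := suffMax_attained array (i + 1).toNat
              (by omega)
            rw [hk3]
            have hkR : ((k : Int)) ∈ PySem.List.pyRange (i + 1) (array.length : Int) 1 := by
              rw [PySem.List.mem_pyRange_one]
              omega
            have hnot : ¬ ((k : Int)) ∈ fl := by rw [hflc]; simp
            rw [hfl] at hnot
            by_contra hge
            push_neg at hge
            exact hnot (List.mem_filter.mpr ⟨hkR, by
              simp only [decide_eq_true_eq]
              rw [pyGetD_toNat _ _ (by omega) (by omega)]
              simpa using hge⟩)
        rw [if_pos hstop, if_pos hcond]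
        have hmax : max (i + 1) (i + 1) = i + 1 := max_self _
        rw [hstop, hmax]
        exact IH ((array.length : Int) - (i + 1)).toNat (by omega) (i + 1) (ans ++ [i]) (by omega) rfl
      | cons a as =>
        -- there is a later element ≥ array[i]: A jumps to stop+1, B binary-searches the same stop
        have hne : fl ≠ [] := by rw [hflc]; simp
        obtain ⟨s, hs⟩ : ∃ s, fl.getLast? = some s := by
          rw [hflc]; exact ⟨as.getLastD a, by simp [List.getLast?_cons]⟩
        have hsmem : s ∈ fl := List.mem_of_getLast? hs
        obtain ⟨⟨hs1, hs2⟩, hs3⟩ := hflmem s hsmem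
        have hsmax : ∀ j ∈ fl, j ≤ s := by
          intro j hj
          refine pairwise_le_getLast fl ?_ j hj s hs
          rw [hfl]
          exact List.Pairwise.filter _ (PySem.List.pairwise_lt_pyRange_one _ _)
        have hstop : fl.getLast?.getD i = s := by rw [hs]; rfl
        have hstopne : ¬ (fl.getLast?.getD i = i) := by rw [hstop]; omega
        rw [hflc] at hstop hstopne
        rw [if_neg hstopne]
        have hlenM : ((suffMax array).length : Int) = (array.length : Int) := by rw [suffMax_length]
        -- B's append-condition is false
        have hcond : ¬ ((array.length : Int) ≤ i + 1 ∨ PySem.List.pyGetD (suffMax array) (i + 1) 0 < v) := by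
          push_neg
          constructor
          · omega
          · rw [pyGetD_toNat _ _ (by omega) (by omega)]
            have h1 : array.getD s.toNat 0 ≤ (suffMax array).getD (i + 1).toNat 0 :=
              suffMax_ge array (i + 1).toNat s.toNat (by omega) (by omega)
            have h2 : v ≤ array.getD s.toNat 0 := by
              rw [← pyGetD_toNat _ _ (by omega) (by omega)]
              exact hs3
            omega
        rw [if_neg hcond]
        -- the binary search returns exactly s
        have hbs := bsearch_correct (((array.length : Int) - 1) - (i + 1)).toNat (suffMax array) v
          (i + 1) ((array.length : Int) - 1) rfl (by omega) (by omega) (by omega)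
          (fun j k hj hjk hk => by
            rw [pyGetD_toNat _ _ (by omega) (by omega), pyGetD_toNat _ _ (by omega) (by omega)]
            exact suffMax_mono array j.toNat k.toNat (by omega) (by omega))
          (by
            rw [pyGetD_toNat _ _ (by omega) (by omega)]
            calc v ≤ array.getD s.toNat 0 := by
                    rw [← pyGetD_toNat _ _ (by omega) (by omega)]; exact hs3
              _ ≤ (suffMax array).getD (i + 1).toNat 0 :=
                    suffMax_ge array (i + 1).toNat s.toNat (by omega) (by omega))
        set r := bsearch (suffMax array) v (i + 1) ((array.length : Int) - 1) with hr
        obtain ⟨hr1, hr2, hr3, hr4⟩ := hbs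
        have hrs : r = s := by
          by_contra hne'
          rcases lt_or_gt_of_ne hne' with hlt' | hgt'
          · -- r < s: bsearch says M[s] < v, but M[s] ≥ array[s] ≥ v
            have h1 := hr4 s hlt' (by omega)
            rw [pyGetD_toNat _ _ (by omega) (by omega)] at h1
            have h2 : array.getD s.toNat 0 ≤ (suffMax array).getD s.toNat 0 :=
              suffMax_ge array s.toNat s.toNat (le_refl _) (by omega)
            have h3 : v ≤ array.getD s.toNat 0 := by
              rw [← pyGetD_toNat _ _ (by omega) (by omega)]; exact hs3
            omega
          · -- s < r: M[r] ≥ v is attained at some k0 ≥ r, contradicting maximality of s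
            rw [pyGetD_toNat _ _ (by omega) (by omega)] at hr3
            obtain ⟨k0, hk01, hk02, hk03⟩ := suffMax_attained array r.toNat (by omega)
            rw [hk03] at hr3
            have hk0R : ((k0 : Int)) ∈ PySem.List.pyRange (i + 1) (array.length : Int) 1 := by
              rw [PySem.List.mem_pyRange_one]
              omega
            have hk0fl : ((k0 : Int)) ∈ fl := by
              rw [hfl]
              refine List.mem_filter.mpr ⟨hk0R, ?_⟩
              simp only [decide_eq_true_eq]
              rw [pyGetD_toNat _ _ (by omega) (by omega)]
              simpa using hr3
            have := hsmax _ hk0fl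
            omega
        have hmax : max (s + 1) (i + 1) = s + 1 := max_eq_left (by omega)
        rw [hstop, hmax, hrs]
        exact IH ((array.length : Int) - (s + 1)).toNat (by omega) (s + 1) ans (by omega) rfl
    · rw [dif_neg hi, dif_neg hi]

-- ===== VERDICT (by name: the statement is the Claim_ definition above) =====
theorem solve_spec : Claim_equal_solve := by
  intro array _
  unfold Spec_solve solve solve_alt
  exact go_eq array ((array.length : Int) - 0).toNat 0 [] (le_refl _) rfl
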